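-- pv_equiv track=rewrite | github.com/MilanRadeta/MITOpenCourseware6.x | 6.009/06-recursion-with-backtracking/q1_practice_a.py | all_consecutives
-- ===== SOURCE A (Python) =====
-- def all_consecutives(vals, n):
--     if n == 0 or n > len(vals):
--         return set()
--
--     if n == 1:
--         return {(val,) for val in vals}
--
--     if n == 2:
--         return {(val, other) for val in vals for other in vals if other - val == 1}
--
--     return {
--         (val,) + s for val in vals
--         for s in all_consecutives({other for other in vals if other > val}, n - 1)}
-- ===== SOURCE B (Python) =====
-- def all_consecutives(vals, n):
--     # Bottom-up DP: build the length-2 tuples once, then repeatedly prepend a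
--     # smaller value, instead of A's recursion that recomputes subset subproblems.
--     if n <= 0 or n > len(vals):
--         return set()
--     if n == 1:
--         return {(v,) for v in vals}
--     tuples = {(v, o) for v in vals for o in vals if o - v == 1}
--     for _ in range(n - 2):
--         tuples = {(v,) + t for v in vals for t in tuples if v < t[0]}
--     return tuples
-- ===== Notes on version B (the rewrite author's own statement) =====
-- stated objective: alternative
-- what changed: A enumerates tuples by top-down recursion over shrinking filtered subsets of vals, recomputing subset subproblems; B builds the set of valid length-2 tuples once and runs a bottom-up loop that n-2 times prepends every smaller value, reusing the previous table.
import Mathlib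
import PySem

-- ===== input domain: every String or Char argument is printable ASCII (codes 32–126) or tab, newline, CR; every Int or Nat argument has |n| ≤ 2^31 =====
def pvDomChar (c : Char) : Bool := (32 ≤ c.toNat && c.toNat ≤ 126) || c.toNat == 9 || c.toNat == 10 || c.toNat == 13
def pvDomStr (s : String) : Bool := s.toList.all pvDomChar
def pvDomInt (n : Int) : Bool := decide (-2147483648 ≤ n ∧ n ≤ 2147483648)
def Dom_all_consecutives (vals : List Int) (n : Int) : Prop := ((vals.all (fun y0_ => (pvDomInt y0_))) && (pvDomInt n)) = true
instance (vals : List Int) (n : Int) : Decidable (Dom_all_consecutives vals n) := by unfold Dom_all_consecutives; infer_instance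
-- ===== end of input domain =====

-- B replaces A's recursion over shrinking subsets by a bottom-up loop that builds the
-- length-2 tuples once and repeatedly prepends smaller values (objective: alternative).

-- ===== PORT A =====
-- termination: the recursive call's set argument is strictly shorter than vals
theorem pv_ofList_filter_lt_length {vals : List Int} (v : Int) (hv : v ∈ vals) :
    (PySem.Set.ofList (vals.filter (fun o => decide (v < o)))).length < vals.length := by
  calc (PySem.Set.ofList (vals.filter (fun o => decide (v < o)))).length
      ≤ (vals.filter (fun o => decide (v < o))).length := PySem.Set.length_ofList_le _
    _ < vals.length := by
        refine List.length_filter_lt_length_iff_exists.mpr ?_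
        exact ⟨v, hv, by simp⟩

def all_consecutives (vals : List Int) (n : Int) : List (List Int) :=
  if n = 0 ∨ (vals.length : Int) < n then []
  else if n = 1 then PySem.Set.ofList (vals.map (fun v => [v]))
  else if n = 2 then
    PySem.Set.ofList (vals.flatMap (fun v => (vals.filter (fun o => o - v == 1)).map (fun o => [v, o])))
  else
    PySem.Set.ofList (vals.attach.flatMap (fun v =>
      (all_consecutives (PySem.Set.ofList (vals.filter (fun o => decide (v.1 < o)))) (n - 1)).map
        (fun s => v.1 :: s)))
termination_by vals.length
decreasing_by
  rw [List.unattach_filter (g := fun o => decide (v.1 < o))]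
  · simpa using pv_ofList_filter_lt_length v.1 v.2
  · intro x h; simp

-- ===== PORT B =====
-- `v < t[0]` from Source B; exact here because every tuple in `tuples` is nonempty (Python's
-- t[0] never raises on the tuples this loop builds)
def pvHeadGt (v : Int) (t : List Int) : Bool :=
  match t with
  | x :: _ => decide (v < x)
  | [] => false

def all_consecutives_alt (vals : List Int) (n : Int) : List (List Int) :=
  if n ≤ 0 ∨ (vals.length : Int) < n then []
  else if n = 1 then PySem.Set.ofList (vals.map (fun v => [v]))
  else
    (PySem.List.pyRange 0 (n - 2) 1).foldl
      (fun T _ => PySem.Set.ofList (vals.flatMap (fun v => (T.filter (pvHeadGt v)).map (fun t => v :: t))))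
      (PySem.Set.ofList (vals.flatMap (fun v => (vals.filter (fun o => o - v == 1)).map (fun o => [v, o]))))

-- ===== PRECONDITION & SPEC =====
def Spec_all_consecutives (vals : List Int) (n : Int) (out : List (List Int)) : Prop := out = all_consecutives_alt vals n
instance (vals : List Int) (n : Int) (out : List (List Int)) : Decidable (Spec_all_consecutives vals n out) := by unfold Spec_all_consecutives; infer_instance

-- ===== CLAIM (what is proved, stated in full; the proofs are below) =====
def Claim_equal_all_consecutives : Prop := ∀ (vals : List Int) (n : Int), Dom_all_consecutives vals n → Spec_all_consecutives vals n (all_consecutives vals n)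

-- ===== LEMMAS AND PROOFS =====

-- the two building blocks of B's loop, named for the proofs
def pvPairs (vals : List Int) : List (List Int) :=
  vals.flatMap (fun v => (vals.filter (fun o => o - v == 1)).map (fun o => [v, o]))

def pvStep (vals : List Int) (T : List (List Int)) : List (List Int) :=
  vals.flatMap (fun v => (T.filter (pvHeadGt v)).map (fun t => v :: t))

def pvGk (vals : List Int) : Nat → List (List Int)
  | 0 => PySem.Set.ofList (pvPairs vals)
  | k + 1 => PySem.Set.ofList (pvStep vals (pvGk vals k))

theorem pvHeadGt_cons (v x : Int) (t : List Int) : pvHeadGt v (x :: t) = decide (v < x) := rfl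

-- B's foldl ignores the loop variable: it is an iterate
theorem pv_foldl_const {α β : Type} (f : β → β) (init : β) (l : List α) :
    l.foldl (fun T _ => f T) init = f^[l.length] init := by
  induction l generalizing init with
  | nil => rfl
  | cons x xs ih => simp [List.foldl_cons, ih, Function.iterate_succ_apply]

theorem pv_iterate_gk (vals : List Int) (k : Nat) :
    (fun T => PySem.Set.ofList (pvStep vals T))^[k] (PySem.Set.ofList (pvPairs vals)) = pvGk vals k := by
  induction k with
  | zero => rfl
  | succ k ih => rw [Function.iterate_succ_apply', ih]; rfl

theorem pv_alt_eq_gk (vals : List Int) (n : Int) (h2 : 2 ≤ n) (hlen : n ≤ (vals.length : Int)) :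
    all_consecutives_alt vals n = pvGk vals (n - 2).toNat := by
  unfold all_consecutives_alt
  rw [if_neg (by omega : ¬(n ≤ 0 ∨ (vals.length : Int) < n)), if_neg (by omega : ¬ n = 1)]
  rw [show n - 2 = (((n - 2).toNat : Nat) : Int) from by omega, PySem.List.pyRange_zero_natCast]
  simp only [Int.toNat_natCast]
  show List.foldl (fun T (_ : Int) => PySem.Set.ofList (pvStep vals T)) (PySem.Set.ofList (pvPairs vals)) _ = _
  rw [pv_foldl_const (f := fun T => PySem.Set.ofList (pvStep vals T)), List.length_map,
    List.length_range, pv_iterate_gk]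

-- filter commutes with Set.add and Set.ofList (first occurrences survive filtering)
theorem pv_filter_add {α : Type} [BEq α] [LawfulBEq α] (s : List α) (x : α) (p : α → Bool) :
    (PySem.Set.add s x).filter p = if p x then PySem.Set.add (s.filter p) x else s.filter p := by
  by_cases hx : x ∈ s
  · rw [PySem.Set.add_of_mem hx]
    split_ifs with hp
    · rw [PySem.Set.add_of_mem (List.mem_filter.mpr ⟨hx, hp⟩)]
    · rfl
  · rw [PySem.Set.add_of_not_mem hx, List.filter_append]
    split_ifs with hp
    · rw [PySem.Set.add_of_not_mem (fun hmem => hx (List.mem_of_mem_filter hmem))]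
      simp [hp]
    · simp [hp]

theorem pv_filter_ofList {α : Type} [BEq α] [LawfulBEq α] (l : List α) (p : α → Bool) :
    (PySem.Set.ofList l).filter p = PySem.Set.ofList (l.filter p) := by
  induction l using List.reverseRecOn with
  | nil => rfl
  | append_singleton xs x ih =>
    rw [PySem.Set.ofList_append_singleton, pv_filter_add, List.filter_append]
    by_cases hp : p x
    · simp [hp, ih, PySem.Set.ofList_append_singleton]
    · simp [hp, ih]

theorem pv_update_congr {α : Type} [BEq α] [LawfulBEq α] (s b b' : List α) (h : PySem.Set.ofList b = PySem.Set.ofList b') :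
    PySem.Set.update s b = PySem.Set.update s b' := by
  rw [PySem.Set.update_eq_append_filter, PySem.Set.update_eq_append_filter, h]

theorem pv_update_of_subset {α : Type} [BEq α] [LawfulBEq α] (s b : List α) (h : ∀ y ∈ b, y ∈ s) :
    PySem.Set.update s b = s := by
  rw [PySem.Set.update_eq_append_filter]
  have hnil : List.filter (fun y => !PySem.Set.contains s y) (PySem.Set.ofList b) = [] := by
    rw [List.filter_eq_nil_iff]
    intro y hy
    have hys := h y ((PySem.Set.mem_ofList b y).mp hy)
    simpa using hys
  rw [hnil, List.append_nil]

-- deduplicating the outer loop's list does not change the resulting set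
theorem pv_update_flatMap_ofList {α β : Type} [BEq α] [LawfulBEq α] [BEq β] [LawfulBEq β] (l : List α) (f : α → List β) (s : List β) :
    PySem.Set.update s ((PySem.Set.ofList l).flatMap f) = PySem.Set.update s (l.flatMap f) := by
  induction l using List.reverseRecOn generalizing s with
  | nil => rfl
  | append_singleton xs x ih =>
    rw [PySem.Set.ofList_append_singleton, List.flatMap_append]
    by_cases hx : x ∈ PySem.Set.ofList xs
    · rw [PySem.Set.add_of_mem hx, ih, PySem.Set.update_append]
      have hxl : x ∈ xs := (PySem.Set.mem_ofList xs x).mp hx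
      refine (pv_update_of_subset _ _ ?_).symm
      intro y hy
      have hy' : y ∈ f x := by simpa using hy
      exact (PySem.Set.mem_update _ _ y).mpr (Or.inr (List.mem_flatMap.mpr ⟨x, hxl, hy'⟩))
    · rw [PySem.Set.add_of_not_mem hx, List.flatMap_append,
        PySem.Set.update_append, PySem.Set.update_append, ih]

theorem pv_ofList_flatMap_ofList {α β : Type} [BEq α] [LawfulBEq α] [BEq β] [LawfulBEq β] (l : List α) (f : α → List β) :
    PySem.Set.ofList ((PySem.Set.ofList l).flatMap f) = PySem.Set.ofList (l.flatMap f) := by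
  rw [← PySem.Set.update_nil_left, ← PySem.Set.update_nil_left (l.flatMap f),
    pv_update_flatMap_ofList]

-- blocks that are equal as sets give equal sets
theorem pv_update_flatMap_congr {α β : Type} [BEq α] [LawfulBEq α] [BEq β] [LawfulBEq β] (l : List α) (f g : α → List β)
    (h : ∀ v ∈ l, PySem.Set.ofList (f v) = PySem.Set.ofList (g v)) (s : List β) :
    PySem.Set.update s (l.flatMap f) = PySem.Set.update s (l.flatMap g) := by
  induction l generalizing s with
  | nil => rfl
  | cons x xs ih =>
    rw [List.flatMap_cons, List.flatMap_cons, PySem.Set.update_append, PySem.Set.update_append,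
      pv_update_congr _ _ _ (h x List.mem_cons_self)]
    exact ih (fun v hv => h v (List.mem_cons_of_mem _ hv)) _

theorem pv_ofList_flatMap_congr {α β : Type} [BEq α] [LawfulBEq α] [BEq β] [LawfulBEq β] (l : List α) (f g : α → List β)
    (h : ∀ v ∈ l, PySem.Set.ofList (f v) = PySem.Set.ofList (g v)) :
    PySem.Set.ofList (l.flatMap f) = PySem.Set.ofList (l.flatMap g) := by
  rw [← PySem.Set.update_nil_left, ← PySem.Set.update_nil_left (l.flatMap g),
    pv_update_flatMap_congr l f g h]

-- a list all of whose elements are `a` dedups to [] or [a]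
theorem pv_ofList_const {α : Type} [BEq α] [LawfulBEq α] (b : List α) (a : α) (h : ∀ y ∈ b, y = a) :
    PySem.Set.ofList b = if b.isEmpty then [] else [a] := by
  induction b with
  | nil => rfl
  | cons x xs ih =>
    rw [PySem.Set.ofList_cons, h x List.mem_cons_self,
      ih (fun y hy => h y (List.mem_cons_of_mem _ hy))]
    have hdis : ∀ s : List α, (∀ y ∈ s, y = a) → PySem.Set.discard s a = [] := by
      intro s hs
      refine List.eq_nil_iff_forall_not_mem.mpr (fun y hy => ?_)
      obtain ⟨hy1, hy2⟩ := (PySem.Set.mem_discard s a y).mp hy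
      exact hy2 (hs y hy1)
    by_cases he : xs.isEmpty
    · simp [he, hdis [] (by simp)]
    · simp [he, hdis [a] (by simp)]

-- invariant of B's table: strictly increasing tuples of length k+2 over vals
theorem pv_gk_inv (vals : List Int) (k : Nat) (t : List Int) (ht : t ∈ pvGk vals k) :
    t.Pairwise (· < ·) ∧ t.length = k + 2 ∧ ∀ x ∈ t, x ∈ vals := by
  induction k generalizing t with
  | zero =>
    simp only [pvGk, pvPairs] at ht
    rw [PySem.Set.mem_ofList] at ht
    obtain ⟨v, hv, o, ⟨homem, heq⟩, rfl⟩ := by simpa using ht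
    refine ⟨by simp; omega, by simp, ?_⟩
    intro x hx
    rcases by simpa using hx with h | h <;> subst h <;> assumption
  | succ k ih =>
    simp only [pvGk, pvStep] at ht
    rw [PySem.Set.mem_ofList] at ht
    obtain ⟨v, hv, t', ⟨htT, hgt⟩, rfl⟩ := by simpa using ht
    obtain ⟨pw, len, hmem⟩ := ih t' htT
    cases t' with
    | nil => simp at len
    | cons x rest =>
      have hvx : v < x := by simpa [pvHeadGt_cons] using hgt
      have hlt : ∀ y ∈ x :: rest, v < y := by
        intro y hy
        rcases List.mem_cons.mp hy with h | h
        · subst h; exact hvx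
        · exact lt_trans hvx ((List.pairwise_cons.mp pw).1 y h)
      refine ⟨List.pairwise_cons.mpr ⟨hlt, pw⟩, by simpa using len, ?_⟩
      intro y hy
      rcases List.mem_cons.mp hy with h | h
      · subst h; exact hv
      · exact hmem y h

theorem pv_nodup_length_le (t W : List Int) (h : t.Nodup) (hs : ∀ x ∈ t, x ∈ W) (hw : W.Nodup) :
    t.length ≤ W.length := by
  have hc := Finset.card_le_card (s := t.toFinset) (t := W.toFinset)
    (fun x hx => by simpa using hs x (by simpa using hx))
  rwa [List.toFinset_card_of_nodup h, List.toFinset_card_of_nodup hw] at hc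

-- if vals has fewer than k+2 distinct elements above val, no tuple survives the filter
theorem pv_filter_gk_nil (vals : List Int) (val : Int) (k : Nat)
    (h : (PySem.Set.ofList (vals.filter (fun o => decide (val < o)))).length < k + 2) :
    (pvGk vals k).filter (pvHeadGt val) = [] := by
  rw [List.filter_eq_nil_iff]
  intro t ht hgt
  obtain ⟨pw, len, hmem⟩ := pv_gk_inv vals k t ht
  cases t with
  | nil => simp [pvHeadGt] at hgt
  | cons x rest =>
    have hvx : val < x := by simpa [pvHeadGt_cons] using hgt
    have hall : ∀ y ∈ x :: rest, val < y := by
      intro y hy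
      rcases List.mem_cons.mp hy with hh | hh
      · subst hh; exact hvx
      · exact lt_trans hvx ((List.pairwise_cons.mp pw).1 y hh)
    have hnodup : (x :: rest).Nodup := pw.imp (fun hlt => ne_of_lt hlt)
    have hsub : ∀ y ∈ x :: rest, y ∈ PySem.Set.ofList (vals.filter (fun o => decide (val < o))) := by
      intro y hy
      rw [PySem.Set.mem_ofList]
      exact List.mem_filter.mpr ⟨hmem y hy, by simpa using hall y hy⟩
    have hle := pv_nodup_length_le (x :: rest) _ hnodup hsub (PySem.Set.nodup_ofList _)
    omega

-- a Prop-conditioned block comprehension is a flatMap over the filtered list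
theorem pv_flatMap_ite (l : List Int) (p : Int → Prop) [DecidablePred p]
    (f : Int → List (List Int)) :
    l.flatMap (fun v => if p v then f v else []) = (l.filter (fun v => decide (p v))).flatMap f := by
  induction l with
  | nil => rfl
  | cons x xs ih => by_cases h : p x <;> simp [h, ih]

-- pushing the head filter inside one step of B's loop
theorem pv_filter_step (vals : List Int) (T : List (List Int)) (val : Int) :
    (pvStep vals T).filter (pvHeadGt val) = pvStep (vals.filter (fun v => decide (val < v))) T := by
  unfold pvStep
  rw [List.filter_flatMap]
  have hblk : (fun v => ((T.filter (pvHeadGt v)).map (fun t => v :: t)).filter (pvHeadGt val)) =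
      (fun v => if val < v then (T.filter (pvHeadGt v)).map (fun t => v :: t) else []) := by
    funext v
    rw [List.filter_map]
    have hcomp : (pvHeadGt val) ∘ (fun t : List Int => v :: t) = fun _ => decide (val < v) := rfl
    rw [hcomp]
    by_cases h : val < v <;> simp [h]
  rw [hblk, pv_flatMap_ite]

theorem pv_filter_pairs (vals : List Int) (val : Int) :
    (pvPairs vals).filter (pvHeadGt val) =
      (vals.filter (fun v => decide (val < v))).flatMap
        (fun v => (vals.filter (fun o => o - v == 1)).map (fun o => [v, o])) := by
  unfold pvPairs
  rw [List.filter_flatMap]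
  have hblk : (fun v => ((vals.filter (fun o => o - v == 1)).map (fun o => [v, o])).filter (pvHeadGt val)) =
      (fun v => if val < v then (vals.filter (fun o => o - v == 1)).map (fun o => [v, o]) else []) := by
    funext v
    rw [List.filter_map]
    have hcomp : (pvHeadGt val) ∘ (fun o : Int => [v, o]) = fun _ => decide (val < v) := rfl
    rw [hcomp]
    by_cases h : val < v <;> simp [h]
  rw [hblk, pv_flatMap_ite]

-- A returns the empty set for every negative n
theorem pv_A_neg (m : Nat) (vals : List Int) (n : Int) (hm : vals.length ≤ m) (hn : n < 0) :
    all_consecutives vals n = [] := by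
  induction m generalizing vals n with
  | zero =>
    have : vals = [] := List.eq_nil_of_length_eq_zero (by omega)
    subst this
    rw [all_consecutives]
    rw [if_neg (by simp; omega), if_neg (by omega), if_neg (by omega)]
    rfl
  | succ m ih =>
    rw [all_consecutives]
    rw [if_neg (by omega), if_neg (by omega), if_neg (by omega)]
    have hnil : vals.attach.flatMap (fun v =>
        (all_consecutives (PySem.Set.ofList (vals.filter (fun o => decide (v.1 < o)))) (n - 1)).map
          (fun s => v.1 :: s)) = [] := by
      rw [List.flatMap_eq_nil_iff]
      intro v _
      rw [ih _ _ (by have := pv_ofList_filter_lt_length v.1 v.2; omega) (by omega)]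
      rfl
    rw [hnil]
    rfl

-- attach-elimination for the transliterated recursion of A
theorem pv_flatMap_attach (l : List Int) (F : Int → List (List Int)) :
    l.attach.flatMap (fun v => F v.1) = l.flatMap F := by
  conv_rhs => rw [← List.attach_map_subtype_val l]
  rw [List.flatMap_map]

-- the main lemma: restricting B's table to heads above val IS A's recursive call
theorem pv_main (k : Nat) (vals : List Int) (val : Int) :
    (pvGk vals k).filter (pvHeadGt val) =
      all_consecutives (PySem.Set.ofList (vals.filter (fun o => decide (val < o)))) ((k : Int) + 2) := by
  induction k generalizing val with
  | zero =>
    simp only [Nat.cast_zero, zero_add]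
    rw [all_consecutives]
    by_cases hlen : ((PySem.Set.ofList (vals.filter (fun o => decide (val < o)))).length : Int) < 2
    · rw [if_pos (Or.inr hlen)]
      exact pv_filter_gk_nil vals val 0 (by omega)
    · rw [if_neg (by omega), if_neg (by omega), if_pos rfl]
      simp only [pvGk]
      rw [pv_filter_ofList, pv_filter_pairs, pv_ofList_flatMap_ofList]
      refine pv_ofList_flatMap_congr _ _ _ ?_
      intro v hv
      obtain ⟨hvv, hvgt'⟩ := List.mem_filter.mp hv
      have hvgt : val < v := by simpa using hvgt'
      have hconst : ∀ (X : List Int), ∀ y ∈ (X.filter (fun o => o - v == 1)).map (fun o => [v, o]),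
          y = ([v, v + 1] : List Int) := by
        intro X y hy
        obtain ⟨o, ho, rfl⟩ := List.mem_map.mp hy
        have h1 : o - v = 1 := by simpa using (List.mem_filter.mp ho).2
        have h2 : o = v + 1 := by omega
        rw [h2]
      rw [pv_ofList_const _ ([v, v + 1] : List Int) (hconst _),
        pv_ofList_const _ ([v, v + 1] : List Int) (hconst _)]
      have hcond : (((PySem.Set.ofList (vals.filter (fun o => decide (val < o)))).filter
            (fun o => o - v == 1)).map (fun o => [v, o])).isEmpty =
          ((vals.filter (fun o => o - v == 1)).map (fun o => [v, o])).isEmpty := by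
        rw [Bool.eq_iff_iff]
        simp only [List.isEmpty_iff, List.map_eq_nil_iff, List.filter_eq_nil_iff]
        constructor
        · intro h o ho heq
          have h1 : o - v = 1 := by simpa using heq
          refine h o ?_ heq
          rw [PySem.Set.mem_ofList]
          exact List.mem_filter.mpr ⟨ho, by simp; omega⟩
        · intro h o ho heq
          exact h o (List.mem_of_mem_filter ((PySem.Set.mem_ofList _ _).mp ho)) heq
      rw [hcond]
  | succ k ih =>
    rw [all_consecutives]
    by_cases hlen : ((PySem.Set.ofList (vals.filter (fun o => decide (val < o)))).length : Int) < ((k + 1 : Nat) : Int) + 2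
    · rw [if_pos (Or.inr hlen)]
      exact pv_filter_gk_nil vals val (k + 1) (by push_cast at hlen; omega)
    · rw [if_neg (by push_cast at hlen ⊢; omega), if_neg (by push_cast; omega), if_neg (by push_cast; omega)]
      simp only [pvGk]
      rw [pv_filter_ofList, pv_filter_step]
      rw [pv_flatMap_attach (PySem.Set.ofList (vals.filter (fun o => decide (val < o))))
        (fun w => (all_consecutives (PySem.Set.ofList
          ((PySem.Set.ofList (vals.filter (fun o => decide (val < o)))).filter
            (fun o => decide (w < o)))) (((k + 1 : Nat) : Int) + 2 - 1)).map (fun s => w :: s)),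
        pv_ofList_flatMap_ofList]
      have hcongr : ∀ v ∈ (vals.filter (fun o => decide (val < o))),
          (all_consecutives (PySem.Set.ofList ((PySem.Set.ofList (vals.filter (fun o => decide (val < o)))).filter (fun o => decide (v < o)))) (((k + 1 : Nat) : Int) + 2 - 1)).map (fun s => v :: s) =
          ((pvGk vals k).filter (pvHeadGt v)).map (fun t => v :: t) := by
        intro v hv
        have hvgt : val < v := by simpa using (List.mem_filter.mp hv).2
        have harg : PySem.Set.ofList ((PySem.Set.ofList (vals.filter (fun o => decide (val < o)))).filter (fun o => decide (v < o))) =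
            PySem.Set.ofList (vals.filter (fun o => decide (v < o))) := by
          rw [pv_filter_ofList, PySem.Set.ofList_ofList, List.filter_filter]
          congr 1
          apply List.filter_congr
          intro o _
          by_cases h : v < o
          · simp [h]; omega
          · simp [h]
        have hn1 : ((k + 1 : Nat) : Int) + 2 - 1 = (k : Int) + 2 := by push_cast; ring
        rw [harg, hn1, ← ih v]
      rw [List.flatMap_congr hcongr]
      rfl

-- ===== VERDICT (by name: the statement is the Claim_ definition above) =====
theorem all_consecutives_spec : Claim_equal_all_consecutives := by
  intro vals n _
  show all_consecutives vals n = all_consecutives_alt vals n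
  by_cases hneg : n < 0
  · rw [pv_A_neg vals.length vals n le_rfl hneg]
    rw [all_consecutives_alt, if_pos (Or.inl (by omega))]
  by_cases h0 : n = 0
  · rw [all_consecutives, if_pos (Or.inl h0), all_consecutives_alt, if_pos (Or.inl (by omega))]
  by_cases hbig : (vals.length : Int) < n
  · rw [all_consecutives, if_pos (Or.inr hbig), all_consecutives_alt, if_pos (Or.inr hbig)]
  by_cases h1 : n = 1
  · subst h1
    rw [all_consecutives, if_neg (c := ((1:Int) = 0 ∨ (vals.length : Int) < 1)) (by omega),
      if_pos rfl, all_consecutives_alt,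
      if_neg (c := ((1:Int) ≤ 0 ∨ (vals.length : Int) < 1)) (by omega), if_pos rfl]
  rw [pv_alt_eq_gk vals n (by omega) (by omega)]
  by_cases h2 : n = 2
  · subst h2
    rw [all_consecutives, if_neg (c := ((2:Int) = 0 ∨ (vals.length : Int) < 2)) (by omega),
      if_neg (c := ((2:Int) = 1)) (by omega), if_pos rfl]
    rfl
  · rw [all_consecutives, if_neg (c := (n = 0 ∨ (vals.length : Int) < n)) (by omega),
      if_neg h1, if_neg h2]
    have hk : (n - 2).toNat = (n - 3).toNat + 1 := by omega
    rw [hk]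
    simp only [pvGk]
    rw [pv_flatMap_attach vals
      (fun w => (all_consecutives (PySem.Set.ofList (vals.filter (fun o => decide (w < o)))) (n - 1)).map
        (fun s => w :: s))]
    have hcongr : ∀ val ∈ vals,
        (all_consecutives (PySem.Set.ofList (vals.filter (fun o => decide (val < o)))) (n - 1)).map (fun s => val :: s) =
        ((pvGk vals (n - 3).toNat).filter (pvHeadGt val)).map (fun t => val :: t) := by
      intro val _
      have hn1 : n - 1 = (((n - 3).toNat : Nat) : Int) + 2 := by omega
      rw [hn1, ← pv_main]
    rw [List.flatMap_congr hcongr]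
    rfl
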